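-- pv_equiv track=rewrite | github.com/Winnetou/quellen | smart_suggest.py | translate_latin_chars
-- ===== SOURCE A (Python) =====
-- def translate_latin_chars(incorrect):
--     dykt = {
--         u'a': u'\u03b1',  # alpha
--         # u'b':,
--         # u'c':,
--         u'd': u'\u03b4',  # delta
--         u'e': u'\u03b5',  # epsilon
--         # u'f':,
--         u'g': u'\u03c2',  # final sigma
--         # u'h':,
--         u'i': u'\u03b9',  # iota
--         # u'j':,
--         # u'k':,
--         # u'l':,
--         # u'm':,
--         u'n': u'\u03c0',  # pi
--         u'o': u'\u03c3',  # sigma or omikron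
--         # u'p':,
--         u'q': u'\u03c1',  # rho
--         u'r': u'\u03b7',  # eta
--         # u's':,
--         u't': u'\u03b9',
--         u'u': u'\u03b1',  # alpha,
--         u'v': u'\u03bd',  # nu
--         u'w': u'\u03c9',  # omega
--         u'x': u'\u03ba',  # kappa
--         u'y': u'\u03b3',  # gamma
--         # u'z':,
--         # u'A':,
--         # u'B':,
--         # u'C':,
--         # u'D':,
--         # u'E':,
--         # u'F':,
--         # u'G':,
--         # u'H':,
--         # u'I':,
--         # u'J':,
--         # u'K':,
--         u'L': u'\u03af',  # iota with acutus
--         # u'M':,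
--         # u'N':,
--         # u'O':,
--         # u'P':,
--         u'Q': u'\u03c1',  # rho
--         # u'R':,
--         u'S': u'\u03b4',  # delta
--         u'T': u'\u03c4',  # small tau
--         # u'U':,
--         # u'V':,
--         # u'W':,
--         u'X': u'\u03bb',  # small lambda
--         # u'Y':,
--         # u'Z':,
--         u'\\': u'\u1f76',  # iota with gravis
--         u'&': u'\u03b8',  # theta
--         u'§': u'\u03be',  # ksi
--         u'6': u'\u03b4',  # delta
--         u'ŕ': u'\u03ae',  # eta z acutusem
--
--     }
--     diphthongs = {u'rj': u'\u1f21',  # eta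
--                   u'qp': u'\u03c6',  # hhi
--                   u'ft': u'\u03bc',  # mi
--                   u'fi': u'\u03b2',  # beta
--                   }
--     for d in diphthongs.keys():
--         incorrect = incorrect.replace(d, diphthongs[d])
--     greek_word = ""
--     for latin_char in incorrect:
--         greek_word += dykt.get(latin_char, latin_char)
--     return greek_word
-- ===== SOURCE B (Python) =====
-- def translate_latin_chars(incorrect):
--     LATIN = u'adeginoqrtuvwxyLQSTX\\&\u00a76\u0155'
--     GREEK = (u'\u03b1\u03b4\u03b5\u03c2\u03b9\u03c0\u03c3\u03c1\u03b7\u03b9'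
--              u'\u03b1\u03bd\u03c9\u03ba\u03b3\u03af\u03c1\u03b4\u03c4\u03bb'
--              u'\u1f76\u03b8\u03be\u03b4\u03ae')
--     table = dict(zip(LATIN, GREEK))
--     digraphs = {u'rj': u'\u1f21', u'qp': u'\u03c6',
--                 u'ft': u'\u03bc', u'fi': u'\u03b2'}
--     # single greedy left-to-right scan instead of staged str.replace passes
--     out = []
--     i = 0
--     n = len(incorrect)
--     while i < n:
--         g = digraphs.get(incorrect[i:i + 2])
--         if g is not None:
--             out.append(g)
--             i += 2
--         else:
--             c = incorrect[i]
--             out.append(table.get(c, c))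
--             i += 1
--     return ''.join(out)
-- ===== Notes on version B (the rewrite author's own statement) =====
-- stated objective: alternative
-- what changed: Replaced the four whole-string str.replace passes plus a separate per-char concatenation loop by one greedy left-to-right indexed scan that looks the two-char window up in a digraph dict and otherwise maps the single char through a table built from two parallel strings, joining the pieces once at the end.
import Mathlib
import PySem

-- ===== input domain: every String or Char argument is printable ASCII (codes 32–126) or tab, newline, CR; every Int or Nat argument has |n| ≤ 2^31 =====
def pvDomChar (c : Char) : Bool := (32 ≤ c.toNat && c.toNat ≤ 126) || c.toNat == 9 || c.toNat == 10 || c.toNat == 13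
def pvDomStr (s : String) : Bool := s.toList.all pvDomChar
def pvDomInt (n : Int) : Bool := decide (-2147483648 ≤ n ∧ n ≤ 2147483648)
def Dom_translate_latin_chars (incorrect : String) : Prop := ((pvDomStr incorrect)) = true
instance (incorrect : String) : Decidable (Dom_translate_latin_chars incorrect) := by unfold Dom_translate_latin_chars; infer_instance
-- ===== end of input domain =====

-- B replaces A's four whole-string str.replace passes plus a per-char mapping loop
-- by a single greedy left-to-right scan over a digraph table and a char table
-- built from two parallel strings (objective: alternative, same cost).

-- ===== PORT A =====
-- A's dict literal `dykt`
def pvDykt : PySem.Dict Char Char := PySem.Dict.ofList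
  [('a', 'α'), ('d', 'δ'), ('e', 'ε'), ('g', 'ς'), ('i', 'ι'), ('n', 'π'),
   ('o', 'σ'), ('q', 'ρ'), ('r', 'η'), ('t', 'ι'), ('u', 'α'), ('v', 'ν'),
   ('w', 'ω'), ('x', 'κ'), ('y', 'γ'), ('L', 'ί'), ('Q', 'ρ'), ('S', 'δ'),
   ('T', 'τ'), ('X', 'λ'), ('\\', 'ὶ'), ('&', 'θ'), ('§', 'ξ'),
   ('6', 'δ'), ('ŕ', 'ή')]

-- A: four sequential str.replace passes over the diphthongs, then a loop that
-- appends dykt.get(c, c) for every char of the replaced string.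
def translate_latin_chars (incorrect : String) : String :=
  let s1 := PySem.Str.replace incorrect "rj" "ἡ"
  let s2 := PySem.Str.replace s1 "qp" "φ"
  let s3 := PySem.Str.replace s2 "ft" "μ"
  let s4 := PySem.Str.replace s3 "fi" "β"
  String.ofList (s4.toList.foldl (fun acc c => acc ++ [pvDykt.getD c c]) [])

-- ===== PORT B =====
-- B's data: the per-char table built from two PARALLEL STRINGS, and the
-- digraph dict keyed by the two-char window (list of ≤ 2 chars = incorrect[i:i+2]).
def pvLatin : String := "adeginoqrtuvwxyLQSTX\\&§6ŕ"
def pvGreek : String := "αδεςιπσρηιανωκγίρδτλὶθξδή"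
def pvTable : PySem.Dict Char Char := PySem.Dict.ofList (pvLatin.toList.zip pvGreek.toList)
def pvDig : PySem.Dict (List Char) Char := PySem.Dict.ofList
  [(['r','j'], 'ἡ'), (['q','p'], 'φ'), (['f','t'], 'μ'), (['f','i'], 'β')]

-- B's while-loop: one greedy left-to-right scan; the two-char window is looked
-- up in the digraph dict (advance 2), else the char goes through the table.
def scanB : List Char → List Char
  | [] => []
  | a :: t =>
    match pvDig.get? (a :: t.take 1) with
    | some g => g :: scanB (t.drop 1)
    | none => pvTable.getD a a :: scanB t
termination_by l => l.length
decreasing_by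
  · simp only [List.length_cons, List.length_drop]; omega
  · simp

def translate_latin_chars_alt (incorrect : String) : String :=
  String.ofList (scanB incorrect.toList)

-- ===== PRECONDITION & SPEC =====
def Spec_translate_latin_chars (incorrect : String) (out : String) : Prop := out = translate_latin_chars_alt incorrect
instance (incorrect : String) (out : String) : Decidable (Spec_translate_latin_chars incorrect out) := by unfold Spec_translate_latin_chars; infer_instance

-- ===== CLAIM (what is proved, stated in full; the proofs are below) =====
def Claim_equal_translate_latin_chars : Prop := ∀ (incorrect : String), Dom_translate_latin_chars incorrect → Spec_translate_latin_chars incorrect (translate_latin_chars incorrect)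

-- ===== LEMMAS AND PROOFS =====

-- B's dicts as literal key/value lists
lemma pvDig_mk : pvDig = PySem.Dict.mk
    [(['r','j'], 'ἡ'), (['q','p'], 'φ'), (['f','t'], 'μ'), (['f','i'], 'β')] := by rfl

lemma pvTable_getD (c : Char) : pvTable.getD c c = pvDykt.getD c c := by
  have h : pvTable = pvDykt := by rfl
  rw [h]

lemma pvDig_one (a : Char) : pvDig.get? [a] = none := by
  simp [pvDig_mk, PySem.Dict.get?]

lemma pvDig_none (a b : Char) (h1 : ¬(a = 'r' ∧ b = 'j')) (h2 : ¬(a = 'q' ∧ b = 'p'))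
    (h3 : ¬(a = 'f' ∧ b = 't')) (h4 : ¬(a = 'f' ∧ b = 'i')) :
    pvDig.get? [a, b] = none := by
  simp only [pvDig_mk, PySem.Dict.get?]
  simp only [not_and] at h1 h2 h3 h4
  simp
  refine ⟨?_, ?_, ?_, ?_⟩ <;> (intro hx hy; subst hx; subst hy; simp_all)

-- the old staged view of the scan, used only to organise the proof:
-- the explicit if-chain form of B's loop, with A's dict
def scanB' : List Char → List Char
  | [] => []
  | [a] => [pvDykt.getD a a]
  | a :: b :: t =>
      if a = 'r' ∧ b = 'j' then 'ἡ' :: scanB' t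
      else if a = 'q' ∧ b = 'p' then 'φ' :: scanB' t
      else if a = 'f' ∧ b = 't' then 'μ' :: scanB' t
      else if a = 'f' ∧ b = 'i' then 'β' :: scanB' t
      else pvDykt.getD a a :: scanB' (b :: t)

lemma scanB_eq_scanB' (l : List Char) : scanB l = scanB' l := by
  induction l using scanB'.induct with
  | case1 => simp [scanB, scanB']
  | case2 a =>
    rw [scanB, scanB']
    simp [pvDig_one, pvTable_getD, scanB]
  | case3 a b t h ih =>
    obtain ⟨ha, hb⟩ := h; subst ha; subst hb
    rw [scanB]; simp only [List.take, List.drop]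
    rw [show pvDig.get? ['r', 'j'] = some 'ἡ' from by rfl]
    simp [scanB', ih]
  | case4 a b t h1 h ih =>
    obtain ⟨ha, hb⟩ := h; subst ha; subst hb
    rw [scanB]; simp only [List.take, List.drop]
    rw [show pvDig.get? ['q', 'p'] = some 'φ' from by rfl]
    simp [scanB', ih]
  | case5 a b t h1 h2 h ih =>
    obtain ⟨ha, hb⟩ := h; subst ha; subst hb
    rw [scanB]; simp only [List.take, List.drop]
    rw [show pvDig.get? ['f', 't'] = some 'μ' from by rfl]
    simp [scanB', ih]
  | case6 a b t h1 h2 h3 h ih =>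
    obtain ⟨ha, hb⟩ := h; subst ha; subst hb
    rw [scanB]; simp only [List.take, List.drop]
    rw [show pvDig.get? ['f', 'i'] = some 'β' from by rfl]
    simp [scanB', ih]
  | case7 a b t h1 h2 h3 h4 ih =>
    rw [scanB]; simp only [List.take, List.drop]
    rw [pvDig_none a b h1 h2 h3 h4]
    rw [pvTable_getD]
    simp [scanB', h1, h2, h3, h4, ih]

-- structural form of one str.replace pass with a 2-char pattern
def repl2 (p1 p2 r : Char) : List Char → List Char
  | [] => []
  | [a] => [a]
  | a :: b :: t =>
    if a = p1 ∧ b = p2 then r :: repl2 p1 p2 r t else a :: repl2 p1 p2 r (b :: t)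

lemma replace_go_eq (p1 p2 r : Char) :
    ∀ fuel l acc, l.length ≤ fuel →
      PySem.Chars.replace.go [p1, p2] [r] fuel l acc = acc.reverse ++ repl2 p1 p2 r l := by
  intro fuel
  induction fuel with
  | zero =>
    intro l acc h
    have : l = [] := List.eq_nil_of_length_eq_zero (Nat.le_zero.mp h)
    subst this
    simp [PySem.Chars.replace.go, repl2]
  | succ fuel ih =>
    intro l acc h
    match l with
    | [] => simp [PySem.Chars.replace.go, repl2]
    | [c] =>
      have hpre : ([p1, p2].isPrefixOf [c]) = false := by
        simp [List.isPrefixOf]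
      rw [PySem.Chars.replace.go]
      simp only [hpre, Bool.false_eq_true, if_false]
      rw [ih [] (c :: acc) (by simp)]
      simp [repl2]
    | c :: b :: t2 =>
      rw [PySem.Chars.replace.go]
      by_cases hm : c = p1 ∧ b = p2
      · have hpre : ([p1, p2].isPrefixOf (c :: b :: t2)) = true := by
          simp [List.isPrefixOf, hm.1, hm.2]
        simp only [hpre, if_true, List.length_cons, List.length_nil, List.drop_succ_cons,
          List.drop_zero]
        rw [ih t2 ([r].reverse ++ acc) (by simp at h ⊢; omega)]
        simp [repl2, hm]
      · have hpre : ([p1, p2].isPrefixOf (c :: b :: t2)) = false := by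
          simp only [List.isPrefixOf, Bool.and_true,
            Bool.and_eq_false_iff, beq_eq_false_iff_ne]
          rcases not_and_or.mp hm with h1 | h1
          · exact Or.inl (fun e => h1 e.symm)
          · exact Or.inr (fun e => h1 e.symm)
        simp only [hpre, Bool.false_eq_true, if_false]
        rw [ih (b :: t2) (c :: acc) (by simp at h ⊢; omega)]
        simp [repl2, hm]

lemma replace_eq_repl2 (p1 p2 r : Char) (l : List Char) :
    PySem.Chars.replace l [p1, p2] [r] = repl2 p1 p2 r l := by
  simp [PySem.Chars.replace, replace_go_eq p1 p2 r l.length l [] le_rfl]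

lemma repl2_cons_skip (p1 p2 r c : Char) (x : List Char)
    (h : c = p1 → x.head? ≠ some p2) :
    repl2 p1 p2 r (c :: x) = c :: repl2 p1 p2 r x := by
  cases x with
  | nil => simp [repl2]
  | cons b t =>
    have : ¬ (c = p1 ∧ b = p2) := by
      rintro ⟨h1, h2⟩; exact h h1 (by simp [h2])
    simp [repl2, this]

lemma repl2_head? (p1 p2 r : Char) (x : List Char) :
    (repl2 p1 p2 r x).head? = x.head? ∨ (repl2 p1 p2 r x).head? = some r := by
  cases x with
  | nil => simp [repl2]
  | cons a y =>
    cases y with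
    | nil => simp [repl2]
    | cons b t =>
      by_cases h : a = p1 ∧ b = p2 <;> simp [repl2, h]

-- the main invariant: the scan equals A's pipeline char-mapped
lemma scanB'_eq (l : List Char) :
    scanB' l =
      (repl2 'f' 'i' 'β' (repl2 'f' 't' 'μ' (repl2 'q' 'p' 'φ'
        (repl2 'r' 'j' 'ἡ' l)))).map (fun c => pvDykt.getD c c) := by
  induction l using scanB'.induct with
  | case1 => simp [scanB', repl2]
  | case2 a => simp [scanB', repl2]
  | case3 a b t h ih =>
    obtain ⟨ha, hb⟩ := h
    subst ha hb
    rw [show repl2 'r' 'j' 'ἡ' ('r' :: 'j' :: t) = 'ἡ' :: repl2 'r' 'j' 'ἡ' t from by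
      simp [repl2]]
    rw [repl2_cons_skip 'q' 'p' 'φ' 'ἡ' _ (fun h' => absurd h' (by decide))]
    rw [repl2_cons_skip 'f' 't' 'μ' 'ἡ' _ (fun h' => absurd h' (by decide))]
    rw [repl2_cons_skip 'f' 'i' 'β' 'ἡ' _ (fun h' => absurd h' (by decide))]
    simp only [List.map_cons, scanB', ih]
    rfl
  | case4 a b t h1 h ih =>
    obtain ⟨ha, hb⟩ := h
    subst ha hb
    rw [repl2_cons_skip 'r' 'j' 'ἡ' 'q' _ (fun h' => absurd h' (by decide))]
    rw [repl2_cons_skip 'r' 'j' 'ἡ' 'p' _ (fun h' => absurd h' (by decide))]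
    rw [show ∀ X, repl2 'q' 'p' 'φ' ('q' :: 'p' :: X) = 'φ' :: repl2 'q' 'p' 'φ' X from
      fun X => by simp [repl2]]
    rw [repl2_cons_skip 'f' 't' 'μ' 'φ' _ (fun h' => absurd h' (by decide))]
    rw [repl2_cons_skip 'f' 'i' 'β' 'φ' _ (fun h' => absurd h' (by decide))]
    simp only [List.map_cons, scanB', ih]
    rfl
  | case5 a b t h1 h2 h ih =>
    obtain ⟨ha, hb⟩ := h
    subst ha hb
    rw [repl2_cons_skip 'r' 'j' 'ἡ' 'f' _ (fun h' => absurd h' (by decide))]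
    rw [repl2_cons_skip 'r' 'j' 'ἡ' 't' _ (fun h' => absurd h' (by decide))]
    rw [repl2_cons_skip 'q' 'p' 'φ' 'f' _ (fun h' => absurd h' (by decide))]
    rw [repl2_cons_skip 'q' 'p' 'φ' 't' _ (fun h' => absurd h' (by decide))]
    rw [show ∀ X, repl2 'f' 't' 'μ' ('f' :: 't' :: X) = 'μ' :: repl2 'f' 't' 'μ' X from
      fun X => by simp [repl2]]
    rw [repl2_cons_skip 'f' 'i' 'β' 'μ' _ (fun h' => absurd h' (by decide))]
    simp only [List.map_cons, scanB', ih]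
    rfl
  | case6 a b t h1 h2 h3 h ih =>
    obtain ⟨ha, hb⟩ := h
    subst ha hb
    rw [repl2_cons_skip 'r' 'j' 'ἡ' 'f' _ (fun h' => absurd h' (by decide))]
    rw [repl2_cons_skip 'r' 'j' 'ἡ' 'i' _ (fun h' => absurd h' (by decide))]
    rw [repl2_cons_skip 'q' 'p' 'φ' 'f' _ (fun h' => absurd h' (by decide))]
    rw [repl2_cons_skip 'q' 'p' 'φ' 'i' _ (fun h' => absurd h' (by decide))]
    rw [show ∀ X, repl2 'f' 't' 'μ' ('f' :: 'i' :: X) = 'f' :: repl2 'f' 't' 'μ' ('i' :: X) from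
      fun X => by simp [repl2]]
    rw [repl2_cons_skip 'f' 't' 'μ' 'i' _ (fun h' => absurd h' (by decide))]
    rw [show ∀ X, repl2 'f' 'i' 'β' ('f' :: 'i' :: X) = 'β' :: repl2 'f' 'i' 'β' X from
      fun X => by simp [repl2]]
    simp only [List.map_cons, scanB', ih]
    rfl
  | case7 a b t h1 h2 h3 h4 ih =>
    -- no digraph starts at this position
    have s1 : repl2 'r' 'j' 'ἡ' (a :: b :: t) = a :: repl2 'r' 'j' 'ἡ' (b :: t) := by
      refine repl2_cons_skip _ _ _ _ _ (fun ha => ?_)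
      rw [List.head?_cons]
      exact fun hb => h1 ⟨ha, Option.some_inj.mp hb⟩
    have hd1 := repl2_head? 'r' 'j' 'ἡ' (b :: t)
    have s2 : repl2 'q' 'p' 'φ' (a :: repl2 'r' 'j' 'ἡ' (b :: t)) =
        a :: repl2 'q' 'p' 'φ' (repl2 'r' 'j' 'ἡ' (b :: t)) := by
      refine repl2_cons_skip _ _ _ _ _ (fun ha => ?_)
      rcases hd1 with hd | hd <;> rw [hd]
      · rw [List.head?_cons]
        exact fun hb => h2 ⟨ha, Option.some_inj.mp hb⟩
      · decide
    have hd2 := repl2_head? 'q' 'p' 'φ' (repl2 'r' 'j' 'ἡ' (b :: t))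
    have s3 : repl2 'f' 't' 'μ' (a :: repl2 'q' 'p' 'φ' (repl2 'r' 'j' 'ἡ' (b :: t))) =
        a :: repl2 'f' 't' 'μ' (repl2 'q' 'p' 'φ' (repl2 'r' 'j' 'ἡ' (b :: t))) := by
      refine repl2_cons_skip _ _ _ _ _ (fun ha => ?_)
      rcases hd2 with hd | hd <;> rw [hd]
      · rcases hd1 with hd' | hd' <;> rw [hd']
        · rw [List.head?_cons]
          exact fun hb => h3 ⟨ha, Option.some_inj.mp hb⟩
        · decide
      · decide
    have hd3 := repl2_head? 'f' 't' 'μ' (repl2 'q' 'p' 'φ' (repl2 'r' 'j' 'ἡ' (b :: t)))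
    have s4 : repl2 'f' 'i' 'β'
          (a :: repl2 'f' 't' 'μ' (repl2 'q' 'p' 'φ' (repl2 'r' 'j' 'ἡ' (b :: t)))) =
        a :: repl2 'f' 'i' 'β' (repl2 'f' 't' 'μ' (repl2 'q' 'p' 'φ' (repl2 'r' 'j' 'ἡ' (b :: t)))) := by
      refine repl2_cons_skip _ _ _ _ _ (fun ha => ?_)
      rcases hd3 with hd | hd <;> rw [hd]
      · rcases hd2 with hd' | hd' <;> rw [hd']
        · rcases hd1 with hd'' | hd'' <;> rw [hd'']
          · rw [List.head?_cons]
            exact fun hb => h4 ⟨ha, Option.some_inj.mp hb⟩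
          · decide
        · decide
      · decide
    rw [s1, s2, s3, s4, List.map_cons]
    rw [show scanB' (a :: b :: t) = pvDykt.getD a a :: scanB' (b :: t) from by
      simp [scanB', h1, h2, h3, h4]]
    rw [ih]

-- ===== VERDICT (by name: the statement is the Claim_ definition above) =====
theorem translate_latin_chars_spec : Claim_equal_translate_latin_chars := by
  intro s _
  unfold Spec_translate_latin_chars translate_latin_chars translate_latin_chars_alt
  refine congrArg String.ofList ?_
  rw [scanB_eq_scanB', scanB'_eq]
  have hrj : ("rj" : String).toList = ['r', 'j'] := rfl
  have hqp : ("qp" : String).toList = ['q', 'p'] := rfl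
  have hft : ("ft" : String).toList = ['f', 't'] := rfl
  have hfi : ("fi" : String).toList = ['f', 'i'] := rfl
  have h1 : ("ἡ" : String).toList = ['ἡ'] := rfl
  have h2 : ("φ" : String).toList = ['φ'] := rfl
  have h3 : ("μ" : String).toList = ['μ'] := rfl
  have h4 : ("β" : String).toList = ['β'] := rfl
  simp only [PySem.Str.toList_replace, hrj, hqp, hft, hfi, h1, h2, h3, h4,
    replace_eq_repl2, PySem.List.foldl_append_singleton_eq_map, List.nil_append]
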